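-- pv_equiv track=rewrite | github.com/maxthecabbie/LeetCode | Arrays and Strings/Easy/Solutions.py | type_str
-- ===== SOURCE A (Python) =====
-- def type_str(s):
--     res = []
--     for c in s:
--         if c.isalpha():
--             res.append(c)
--         elif res:
--             res.pop()
--     return "".join(res)
-- ===== SOURCE B (Python) =====
-- def type_str(s):
--     skip = 0
--     out = []
--     for c in reversed(s):
--         if not c.isalpha():
--             skip += 1
--         elif skip:
--             skip -= 1
--         else:
--             out.append(c)
--     return "".join(reversed(out))
-- ===== Notes on version B (the rewrite author's own statement) =====
-- stated objective: alternative
-- what changed: Replaces the forward stack with pushes/pops by a single reverse traversal maintaining an integer skip counter, collecting kept letters and reversing once at the end.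
import Mathlib
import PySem

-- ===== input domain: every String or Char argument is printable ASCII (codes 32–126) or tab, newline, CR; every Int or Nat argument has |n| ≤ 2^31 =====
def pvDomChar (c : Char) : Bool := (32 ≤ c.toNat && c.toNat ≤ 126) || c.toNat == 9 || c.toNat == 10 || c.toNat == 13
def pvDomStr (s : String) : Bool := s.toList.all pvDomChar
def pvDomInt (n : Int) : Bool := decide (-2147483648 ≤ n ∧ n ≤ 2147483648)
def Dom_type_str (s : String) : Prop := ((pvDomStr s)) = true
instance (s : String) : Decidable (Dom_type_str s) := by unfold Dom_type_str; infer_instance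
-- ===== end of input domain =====

-- B replaces A's forward letter stack (push on a letter, pop on anything else) by a single
-- reverse traversal with an integer skip counter, reversing the collected letters once at the end
-- (objective: alternative — same O(n) cost, different mechanism).

-- ===== PORT A =====
-- the body of A's loop: append on a letter, pop (if nonempty) otherwise
def typeStrStepA (res : List Char) (c : Char) : List Char :=
  if PySem.Chars.isalpha c then res ++ [c]
  else if res ≠ [] then res.dropLast
  else res

def type_str (s : String) : String :=
  String.ofList (s.toList.foldl typeStrStepA [])

-- ===== PORT B =====
-- B's loop over reversed(s): state = (skip counter, collected letters, appended in reverse order)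
def typeStrGoB : List Char → Nat → List Char → List Char
  | [], _, out => out
  | c :: cs, skip, out =>
    if ¬ PySem.Chars.isalpha c then typeStrGoB cs (skip + 1) out
    else if skip ≠ 0 then typeStrGoB cs (skip - 1) out
    else typeStrGoB cs skip (out ++ [c])

def type_str_alt (s : String) : String :=
  String.ofList ((typeStrGoB s.toList.reverse 0 []).reverse)

-- ===== PRECONDITION & SPEC =====
def Spec_type_str (s : String) (out : String) : Prop := out = type_str_alt s
instance (s : String) (out : String) : Decidable (Spec_type_str s out) := by unfold Spec_type_str; infer_instance

-- ===== CLAIM (what is proved, stated in full; the proofs are below) =====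
def Claim_equal_type_str : Prop := ∀ (s : String), Dom_type_str s → Spec_type_str s (type_str s)

-- ===== LEMMAS AND PROOFS =====

-- drop the last k elements
def dropLastN : Nat → List Char → List Char
  | 0, xs => xs
  | k + 1, xs => dropLastN k xs.dropLast

theorem dropLastN_nil (k : Nat) : dropLastN k [] = [] := by
  induction k with
  | zero => rfl
  | succ k ih => simpa [dropLastN] using ih

theorem typeStrGoB_out (cs : List Char) : ∀ (skip : Nat) (out : List Char),
    typeStrGoB cs skip out = out ++ typeStrGoB cs skip [] := by
  induction cs with
  | nil => intro skip out; simp [typeStrGoB]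
  | cons c cs ih =>
    intro skip out
    by_cases h : PySem.Chars.isalpha c
    · by_cases hk : skip = 0
      · have e : ∀ o : List Char, typeStrGoB (c :: cs) skip o = typeStrGoB cs skip (o ++ [c]) := by
          intro o; simp [typeStrGoB, h, hk]
        rw [e out, e [], ih skip (out ++ [c]), ih skip ([] ++ [c])]
        simp
      · have e : ∀ o : List Char, typeStrGoB (c :: cs) skip o = typeStrGoB cs (skip - 1) o := by
          intro o; simp [typeStrGoB, h, hk]
        rw [e out, e []]
        exact ih _ _
    · have e : ∀ o : List Char, typeStrGoB (c :: cs) skip o = typeStrGoB cs (skip + 1) o := by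
        intro o; simp [typeStrGoB, h]
      rw [e out, e []]
      exact ih _ _

theorem typeStrGoB_dropLastN (l : List Char) : ∀ (k : Nat),
    (typeStrGoB l.reverse k []).reverse = dropLastN k (l.foldl typeStrStepA []) := by
  induction l using List.reverseRecOn with
  | nil => intro k; simp [typeStrGoB, dropLastN_nil]
  | append_singleton l c ih =>
    intro k
    rw [List.reverse_append, List.foldl_append]
    simp only [List.reverse_singleton, List.singleton_append, List.foldl_cons, List.foldl_nil]
    by_cases h : PySem.Chars.isalpha c
    · cases k with
      | zero =>
        have e : typeStrGoB (c :: l.reverse) 0 [] = typeStrGoB l.reverse 0 ([] ++ [c]) := by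
          simp [typeStrGoB, h]
        rw [e, typeStrGoB_out l.reverse 0 ([] ++ [c])]
        simp only [List.nil_append, List.singleton_append, List.reverse_cons]
        rw [ih 0]
        simp [dropLastN, typeStrStepA, h]
      | succ k =>
        have e : typeStrGoB (c :: l.reverse) (k + 1) [] = typeStrGoB l.reverse k [] := by
          simp [typeStrGoB, h]
        rw [e, ih k]
        simp [dropLastN, typeStrStepA, h]
    · have e : typeStrGoB (c :: l.reverse) k [] = typeStrGoB l.reverse (k + 1) [] := by
        simp [typeStrGoB, h]
      rw [e, ih (k + 1)]
      have hstep : typeStrStepA (l.foldl typeStrStepA []) c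
          = (l.foldl typeStrStepA []).dropLast := by
        by_cases hr : l.foldl typeStrStepA [] = []
        · simp [typeStrStepA, h, hr]
        · simp [typeStrStepA, h, hr]
      rw [hstep]
      rfl

-- ===== VERDICT (by name: the statement is the Claim_ definition above) =====
theorem type_str_spec : Claim_equal_type_str := by
  intro s _
  unfold Spec_type_str type_str type_str_alt
  rw [typeStrGoB_dropLastN s.toList 0]
  rfl
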